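-- pv_equiv track=rewrite | github.com/Wandererer/codebeacon | codebeacon/contextmap/generator.py | _strip_codebeacon_block
-- ===== SOURCE A (Python) =====
-- _BLOCK_START = "<!-- codebeacon:start -->"
--
-- _BLOCK_END   = "<!-- codebeacon:end -->"
--
-- _LEGACY_PATTERNS = (
--     "## MANDATORY: Lookup Strategy",
--     "## Lookup Strategy",
--     "## Context Lookup Protocol",
--     "### Step 1 → codebeacon wiki",
--     "### Step 2 → codebeacon obsidian",
--     "### Step 3 → source file",
--     "### Prohibited actions",
--     "## Projects",
--     "## Common Commands",
--     "## Architecture",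
--     "## High-Impact Files",
--     "_Generated by [codebeacon]",
-- )
--
-- def _strip_codebeacon_block(existing: str) -> str:
--     """Remove a previously generated codebeacon block from *existing* text.
--
--     Handles two formats:
--     1. Marker-delimited blocks  <!-- codebeacon:start --> … <!-- codebeacon:end -->
--     2. Legacy files (no markers): heuristically drops lines that belong to a
--        contiguous codebeacon section identified by _LEGACY_PATTERNS.
--     """
--     # ── Format 1: marker-delimited ──
--     if _BLOCK_START in existing:
--         before = existing[:existing.index(_BLOCK_START)]
--         after_marker = existing[existing.index(_BLOCK_START) + len(_BLOCK_START):]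
--         if _BLOCK_END in after_marker:
--             after = after_marker[after_marker.index(_BLOCK_END) + len(_BLOCK_END):]
--         else:
--             after = ""
--         return (before + after).strip()
--
--     # ── Format 2: legacy heuristic ──
--     lines = existing.splitlines()
--     cleaned: list[str] = []
--     inside = False
--     for line in lines:
--         stripped = line.strip()
--         if any(stripped.startswith(p) for p in _LEGACY_PATTERNS):
--             inside = True
--         if inside:
--             # Exit the codebeacon section when we hit a user heading that is
--             # NOT a codebeacon heading, after we've already entered one.
--             if stripped.startswith("#") and not any(
--                 stripped.startswith(p) for p in _LEGACY_PATTERNS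
--             ):
--                 inside = False
--                 cleaned.append(line)
--         else:
--             cleaned.append(line)
--
--     return "\n".join(cleaned).strip()
-- ===== SOURCE B (Python) =====
-- _BLOCK_START = "<!-- codebeacon:start -->"
--
-- _BLOCK_END   = "<!-- codebeacon:end -->"
--
-- _LEGACY_PATTERNS = (
--     "## MANDATORY: Lookup Strategy",
--     "## Lookup Strategy",
--     "## Context Lookup Protocol",
--     "### Step 1 → codebeacon wiki",
--     "### Step 2 → codebeacon obsidian",
--     "### Step 3 → source file",
--     "### Prohibited actions",
--     "## Projects",
--     "## Common Commands",
--     "## Architecture",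
--     "## High-Impact Files",
--     "_Generated by [codebeacon]",
-- )
--
--
-- def _is_legacy(stripped):
--     return any(stripped.startswith(p) for p in _LEGACY_PATTERNS)
--
--
-- def _strip_codebeacon_block(existing: str) -> str:
--     # Format 1: marker-delimited, via str.partition
--     if _BLOCK_START in existing:
--         before, _, rest = existing.partition(_BLOCK_START)
--         _, _, after = rest.partition(_BLOCK_END)
--         return (before + after).strip()
--
--     # Format 2: index-based excision over lines (two-scan, no boolean state)
--     lines = existing.splitlines()
--     out = []
--     i = 0
--     n = len(lines)
--     while i < n:
--         s = lines[i].strip()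
--         if _is_legacy(s):
--             # skip the block: drop lines from i up to (not incl.) the exit heading
--             i += 1
--             while i < n:
--                 t = lines[i].strip()
--                 if t.startswith("#") and not _is_legacy(t):
--                     break
--                 i += 1
--             # the exit heading (if any) is handled by the outer loop and kept
--         else:
--             out.append(lines[i])
--             i += 1
--     return "\n".join(out).strip()
-- ===== Notes on version B (the rewrite author's own statement) =====
-- stated objective: alternative
-- what changed: The marker branch uses str.partition instead of repeated index/slicing, and the legacy branch replaces the boolean in/out state machine folded over all lines with an index-based two-scan excision: an outer scan copies lines until a legacy block start, an inner scan skips to the exit heading, and the outer scan resumes there.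
import Mathlib
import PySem

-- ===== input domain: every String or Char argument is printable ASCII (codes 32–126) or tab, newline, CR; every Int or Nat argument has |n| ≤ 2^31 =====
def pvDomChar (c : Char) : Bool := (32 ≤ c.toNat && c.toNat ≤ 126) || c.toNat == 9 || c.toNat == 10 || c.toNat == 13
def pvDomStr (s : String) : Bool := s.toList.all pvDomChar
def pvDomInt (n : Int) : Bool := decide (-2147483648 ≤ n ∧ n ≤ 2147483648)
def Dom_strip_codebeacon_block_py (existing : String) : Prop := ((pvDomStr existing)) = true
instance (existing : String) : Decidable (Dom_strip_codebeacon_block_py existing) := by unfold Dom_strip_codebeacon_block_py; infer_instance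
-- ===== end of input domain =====

-- B replaces A's boolean-state fold over lines by an index-free two-scan excision
-- (outer copy scan / inner skip scan) and uses a partition helper for the marker
-- branch; objective: alternative decomposition, same cost.


-- ===== PORT A =====
def pvBlockStart : String := "<!-- codebeacon:start -->"
def pvBlockEnd : String := "<!-- codebeacon:end -->"
def pvLegacyPatterns : List String :=
  ["## MANDATORY: Lookup Strategy",
   "## Lookup Strategy",
   "## Context Lookup Protocol",
   "### Step 1 → codebeacon wiki",
   "### Step 2 → codebeacon obsidian",
   "### Step 3 → source file",
   "### Prohibited actions",
   "## Projects",
   "## Common Commands",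
   "## Architecture",
   "## High-Impact Files",
   "_Generated by [codebeacon]"]

-- any(stripped.startswith(p) for p in _LEGACY_PATTERNS)
def pvIsPat (stripped : String) : Bool :=
  pvLegacyPatterns.any (fun p => PySem.Str.startswith stripped p)

-- one iteration of A's legacy for-loop: state = (cleaned, inside)
def pvAStep (st : List String × Bool) (line : String) : List String × Bool :=
  let stripped := PySem.Str.strip line
  let inside := st.2 || pvIsPat stripped
  if inside then
    if PySem.Str.startswith stripped "#" && !(pvIsPat stripped) then (st.1 ++ [line], false)
    else (st.1, true)
  else (st.1 ++ [line], false)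

def strip_codebeacon_block_py (existing : String) : String :=
  if PySem.Str.isIn pvBlockStart existing then
    -- existing.index(_BLOCK_START) is guarded by the 'in' test, so find ≥ 0 here
    let i := PySem.Str.find existing pvBlockStart
    let before := PySem.Str.slice existing none (some i)
    let after_marker := PySem.Str.slice existing (some (i + PySem.Str.len pvBlockStart)) none
    let after :=
      if PySem.Str.isIn pvBlockEnd after_marker then
        PySem.Str.slice after_marker
          (some (PySem.Str.find after_marker pvBlockEnd + PySem.Str.len pvBlockEnd)) none
      else ""
    PySem.Str.strip (before ++ after)
  else
    let lines := PySem.Str.splitlines existing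
    let cleaned := (lines.foldl pvAStep ([], false)).1
    PySem.Str.strip (PySem.Str.join "\n" cleaned)

-- ===== PORT B =====
-- hand port of str.partition(sep) for non-empty sep (exact: find = first occurrence)
def pvPartition (s sep : String) : String × String × String :=
  let i := PySem.Str.find s sep
  if i == -1 then (s, "", "")
  else (PySem.Str.slice s none (some i), sep,
        PySem.Str.slice s (some (i + PySem.Str.len sep)) none)

mutual
-- outer scan: copy lines until a legacy block start (that line is dropped)
def pvScanOut : List String → List String
  | [] => []
  | l :: ls =>
    let s := PySem.Str.strip l
    if pvIsPat s then pvScanIn ls else l :: pvScanOut ls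
-- inner scan: skip to the exit heading, which is kept, and resume the outer scan
def pvScanIn : List String → List String
  | [] => []
  | l :: ls =>
    let s := PySem.Str.strip l
    if PySem.Str.startswith s "#" && !(pvIsPat s) then l :: pvScanOut ls
    else pvScanIn ls
end

def strip_codebeacon_block_py_alt (existing : String) : String :=
  if PySem.Str.isIn pvBlockStart existing then
    let p1 := pvPartition existing pvBlockStart
    let p2 := pvPartition p1.2.2 pvBlockEnd
    PySem.Str.strip (p1.1 ++ p2.2.2)
  else
    PySem.Str.strip (PySem.Str.join "\n" (pvScanOut (PySem.Str.splitlines existing)))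

-- ===== PRECONDITION & SPEC =====
def Spec_strip_codebeacon_block_py (existing : String) (out : String) : Prop := out = strip_codebeacon_block_py_alt existing
instance (existing : String) (out : String) : Decidable (Spec_strip_codebeacon_block_py existing out) := by unfold Spec_strip_codebeacon_block_py; infer_instance

-- ===== CLAIM (what is proved, stated in full; the proofs are below) =====
def Claim_equal_strip_codebeacon_block_py : Prop := ∀ (existing : String), Dom_strip_codebeacon_block_py existing → Spec_strip_codebeacon_block_py existing (strip_codebeacon_block_py existing)

-- ===== LEMMAS AND PROOFS =====

-- A's fold from inside=false computes the outer scan, from inside=true the inner scan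
theorem pvFold_eq (ls : List String) : ∀ acc : List String,
    (List.foldl pvAStep (acc, false) ls).1 = acc ++ pvScanOut ls ∧
    (List.foldl pvAStep (acc, true) ls).1 = acc ++ pvScanIn ls := by
  induction ls with
  | nil => intro acc; simp [pvScanOut, pvScanIn]
  | cons l ls ih =>
    intro acc
    by_cases h1 : pvIsPat (PySem.Str.strip l) = true
    · simp [pvAStep, pvScanOut, pvScanIn, h1, ih]
    · by_cases h2 : PySem.Chars.startswith (PySem.Chars.strip l.toList) ['#'] = true
      · simp [pvAStep, pvScanOut, pvScanIn, h1, h2, ih]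
      · simp [pvAStep, pvScanOut, pvScanIn, h1, h2, ih]

theorem strip_codebeacon_block_py_spec : Claim_equal_strip_codebeacon_block_py := by
  intro existing _
  show strip_codebeacon_block_py existing = strip_codebeacon_block_py_alt existing
  by_cases h : PySem.Str.isIn pvBlockStart existing = true
  · have hfind : ¬ (PySem.Str.find existing pvBlockStart = -1) := by
      rw [PySem.Str.find_eq_neg_one_iff]
      rw [PySem.Str.isIn_iff_infix] at h
      exact fun hc => hc h
    have e1 : pvPartition existing pvBlockStart =
        (PySem.Str.slice existing none (some (PySem.Str.find existing pvBlockStart)), pvBlockStart,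
         PySem.Str.slice existing
           (some (PySem.Str.find existing pvBlockStart + PySem.Str.len pvBlockStart)) none) := by
      simp only [pvPartition]
      rw [if_neg (by simpa using hfind)]
    simp only [strip_codebeacon_block_py, strip_codebeacon_block_py_alt, h, if_true, e1]
    by_cases h2 : PySem.Str.isIn pvBlockEnd
        (PySem.Str.slice existing
          (some (PySem.Str.find existing pvBlockStart + PySem.Str.len pvBlockStart)) none) = true
    · have hfind2 : ¬ (PySem.Str.find
          (PySem.Str.slice existing
            (some (PySem.Str.find existing pvBlockStart + PySem.Str.len pvBlockStart)) none)
          pvBlockEnd = -1) := by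
        rw [PySem.Str.find_eq_neg_one_iff]
        rw [PySem.Str.isIn_iff_infix] at h2
        exact fun hc => hc h2
      have e2 : pvPartition
          (PySem.Str.slice existing
            (some (PySem.Str.find existing pvBlockStart + PySem.Str.len pvBlockStart)) none)
          pvBlockEnd =
          (PySem.Str.slice
            (PySem.Str.slice existing
              (some (PySem.Str.find existing pvBlockStart + PySem.Str.len pvBlockStart)) none)
            none
            (some (PySem.Str.find
              (PySem.Str.slice existing
                (some (PySem.Str.find existing pvBlockStart + PySem.Str.len pvBlockStart)) none)
              pvBlockEnd)), pvBlockEnd,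
           PySem.Str.slice
            (PySem.Str.slice existing
              (some (PySem.Str.find existing pvBlockStart + PySem.Str.len pvBlockStart)) none)
            (some (PySem.Str.find
              (PySem.Str.slice existing
                (some (PySem.Str.find existing pvBlockStart + PySem.Str.len pvBlockStart)) none)
              pvBlockEnd + PySem.Str.len pvBlockEnd)) none) := by
        simp only [pvPartition]
        rw [if_neg (by simpa using hfind2)]
      simp only [h2, if_true, e2]
    · have hfind2 : PySem.Str.find
          (PySem.Str.slice existing
            (some (PySem.Str.find existing pvBlockStart + PySem.Str.len pvBlockStart)) none)
          pvBlockEnd = -1 := by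
        rw [PySem.Str.find_eq_neg_one_iff]
        rw [PySem.Str.isIn_iff_infix] at h2
        simpa using h2
      have e2 : pvPartition
          (PySem.Str.slice existing
            (some (PySem.Str.find existing pvBlockStart + PySem.Str.len pvBlockStart)) none)
          pvBlockEnd =
          (PySem.Str.slice existing
            (some (PySem.Str.find existing pvBlockStart + PySem.Str.len pvBlockStart)) none, "", "") := by
        simp only [pvPartition]
        rw [if_pos (by simpa using hfind2)]
      simp only [h2, if_false, Bool.false_eq_true, e2]
  · simp only [strip_codebeacon_block_py, strip_codebeacon_block_py_alt, h, if_false,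
      Bool.false_eq_true]
    rw [(pvFold_eq (PySem.Str.splitlines existing) []).1]
    simp
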